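-- pv_equiv track=rewrite | github.com/Tanvi-Gajula/Python-Projects | ArogyaWebApplication.py | get_best_disease
-- ===== SOURCE A (Python) =====
-- def get_best_disease(responses, possible_diseases):
--     disease_scores = {disease: 0 for disease, _ in possible_diseases}
--
--     for disease in disease_scores.keys():
--         positive_responses = responses.get(disease, [])
--         disease_scores[disease] = sum(1 for response in positive_responses if response == 'yes')
--
--     # Determine the disease with the highest score
--     if disease_scores:
--         best_disease = max(disease_scores, key=disease_scores.get)
--         return best_disease
--     return None
-- ===== SOURCE B (Python) =====
-- def get_best_disease(responses, possible_diseases):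
--     # Single pass, no score table: track the running best with strict '>' so
--     # the earliest disease wins ties, matching max()'s first-key semantics.
--     best_disease = None
--     best_score = -1
--     for disease, _ in possible_diseases:
--         score = sum(1 for r in responses.get(disease, []) if r == 'yes')
--         if score > best_score:
--             best_disease = disease
--             best_score = score
--     return best_disease
-- ===== Notes on version B (the rewrite author's own statement) =====
-- stated objective: simpler
-- what changed: Drops the intermediate score dictionary and its separate fill/max passes; one fold over possible_diseases keeps a running (best_disease, best_score) pair updated on strict '>', reproducing max's first-key tie-breaking and None on empty input.
import Mathlib
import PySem

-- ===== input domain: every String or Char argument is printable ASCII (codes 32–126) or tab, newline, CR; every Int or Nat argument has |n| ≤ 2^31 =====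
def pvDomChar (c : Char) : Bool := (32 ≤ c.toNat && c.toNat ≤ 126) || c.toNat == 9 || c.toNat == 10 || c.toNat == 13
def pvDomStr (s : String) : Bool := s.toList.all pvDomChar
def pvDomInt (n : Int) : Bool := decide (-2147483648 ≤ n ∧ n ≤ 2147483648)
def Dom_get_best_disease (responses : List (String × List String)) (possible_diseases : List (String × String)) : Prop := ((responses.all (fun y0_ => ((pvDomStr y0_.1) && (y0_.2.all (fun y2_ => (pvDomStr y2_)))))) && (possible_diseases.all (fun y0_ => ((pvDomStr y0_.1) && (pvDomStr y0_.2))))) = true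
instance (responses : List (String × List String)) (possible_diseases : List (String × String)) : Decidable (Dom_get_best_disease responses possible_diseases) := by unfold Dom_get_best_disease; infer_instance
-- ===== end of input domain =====

-- ===== PORT A =====
-- B drops A's score dictionary: one fold over possible_diseases keeps a running best pair (simpler; same cost).
-- sum(1 for r in L if r == 'yes')
def pySumYes (l : List String) : Int :=
  l.foldl (fun acc r => if r == "yes" then acc + 1 else acc) 0

def get_best_disease (responses : List (String × List String)) (possible_diseases : List (String × String)) : Option String :=
  let responsesD := PySem.Dict.ofList responses
  -- disease_scores = {disease: 0 for disease, _ in possible_diseases}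
  let disease_scores := possible_diseases.foldl (fun d p => d.insert p.1 (0 : Int)) PySem.Dict.empty
  -- for disease in disease_scores.keys(): disease_scores[disease] = sum(...)
  let disease_scores2 := disease_scores.keys.foldl
      (fun d disease => d.insert disease (pySumYes (responsesD.getD disease [])))
      disease_scores
  -- if disease_scores: return max(disease_scores, key=disease_scores.get)  else return None
  if disease_scores2.size ≠ 0 then
    PySem.List.max? disease_scores2.keys (fun k => disease_scores2.getD k 0)
  else none

-- ===== PORT B =====
def get_best_disease_alt (responses : List (String × List String)) (possible_diseases : List (String × String)) : Option String :=
  let responsesD := PySem.Dict.ofList responses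
  (possible_diseases.foldl
     (fun (st : Option String × Int) p =>
        let score := pySumYes (responsesD.getD p.1 [])
        if st.2 < score then (some p.1, score) else st)
     (none, -1)).1

-- ===== PRECONDITION & SPEC =====
def Spec_get_best_disease (responses : List (String × List String)) (possible_diseases : List (String × String)) (out : Option String) : Prop := out = get_best_disease_alt responses possible_diseases
instance (responses : List (String × List String)) (possible_diseases : List (String × String)) (out : Option String) : Decidable (Spec_get_best_disease responses possible_diseases out) := by unfold Spec_get_best_disease; infer_instance

-- ===== CLAIM (what is proved, stated in full; the proofs are below) =====
def Claim_equal_get_best_disease : Prop := ∀ (responses : List (String × List String)) (possible_diseases : List (String × String)), Dom_get_best_disease responses possible_diseases → Spec_get_best_disease responses possible_diseases (get_best_disease responses possible_diseases)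

-- ===== LEMMAS AND PROOFS =====

-- the step of PySem.List.max? (first maximal element)
def maxStep (f : String → Int) (acc : Option String) (x : String) : Option String :=
  match acc with
  | none => some x
  | some m => if f m < f x then some x else some m

theorem max?_eq_foldl_maxStep (f : String → Int) (xs : List String) :
    PySem.List.max? xs f = xs.foldl (maxStep f) none := by
  unfold PySem.List.max?
  congr 1
  funext acc x
  cases acc <;> rfl

-- the new (previously unseen) elements of xs relative to seen-set s, in order
def newElems (s : List String) : List String → List String
  | [] => []
  | x :: t => if PySem.Set.contains s x then newElems s t else x :: newElems (s ++ [x]) t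

theorem update_eq_append_newElems (xs : List String) : ∀ (s : List String),
    PySem.Set.update s xs = s ++ newElems s xs := by
  induction xs with
  | nil => intro s; simp [PySem.Set.update, newElems]
  | cons x t ih =>
    intro s
    simp only [PySem.Set.update, List.foldl_cons, PySem.Set.add, newElems]
    by_cases h : PySem.Set.contains s x = true
    · rw [if_pos h, if_pos h]
      simpa [PySem.Set.update] using ih s
    · rw [if_neg h, if_neg h]
      simpa [PySem.Set.update, List.append_assoc] using ih (s ++ [x])

theorem foldl_maxStep_newElems (f : String → Int) (xs : List String) :
    ∀ (s : List String) (acc : Option String),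
    (∀ x ∈ s, ∃ m, acc = some m ∧ f x ≤ f m) →
    (newElems s xs).foldl (maxStep f) acc = xs.foldl (maxStep f) acc := by
  induction xs with
  | nil => intro s acc _; rfl
  | cons x t ih =>
    intro s acc hinv
    by_cases h : PySem.Set.contains s x = true
    · have hx : x ∈ s := by simpa [PySem.Set.contains] using h
      obtain ⟨m, hm, hle⟩ := hinv x hx
      have hstep : maxStep f acc x = acc := by
        subst hm; simp [maxStep, not_lt.mpr hle]
      rw [newElems, if_pos h, List.foldl_cons, hstep]
      exact ih s acc hinv
    · rw [newElems, if_neg h, List.foldl_cons, List.foldl_cons]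
      apply ih (s ++ [x])
      intro y hy
      rcases List.mem_append.mp hy with hy | hy
      · obtain ⟨m, hm, hle⟩ := hinv y hy
        subst hm
        by_cases hlt : f m < f x
        · exact ⟨x, by simp [maxStep, hlt], le_of_lt (lt_of_le_of_lt hle hlt)⟩
        · exact ⟨m, by simp [maxStep, hlt], hle⟩
      · have hyx : y = x := by simpa using hy
        subst hyx
        cases acc with
        | none => exact ⟨y, rfl, le_refl _⟩
        | some m =>
          by_cases hlt : f m < f y
          · exact ⟨y, by simp [maxStep, hlt], le_refl _⟩
          · exact ⟨m, by simp [maxStep, hlt], not_lt.mp hlt⟩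

theorem foldl_maxStep_congr (f g : String → Int) (xs : List String) :
    ∀ (acc : Option String),
    (∀ x ∈ xs, f x = g x) → (∀ m, acc = some m → f m = g m) →
    xs.foldl (maxStep f) acc = xs.foldl (maxStep g) acc := by
  induction xs with
  | nil => intro acc _ _; rfl
  | cons x t ih =>
    intro acc hxs hacc
    have hx : f x = g x := hxs x (by simp)
    have hstep : maxStep f acc x = maxStep g acc x := by
      cases acc with
      | none => rfl
      | some m => simp [maxStep, hx, hacc m rfl]
    rw [List.foldl_cons, List.foldl_cons, hstep]
    apply ih
    · exact fun y hy => hxs y (by simp [hy])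
    · intro m hm
      cases acc with
      | none =>
        simp only [maxStep] at hm
        injection hm with h
        subst h
        exact hx
      | some m0 =>
        simp only [maxStep] at hm
        split at hm <;> injection hm with h <;> subst h
        · exact hx
        · exact hacc _ rfl

-- second fold (rescore loop): getD at a key of a Nodup key list
theorem getD_foldl_insert_not_mem (g : String → Int) (k : String) (L : List String) :
    ∀ (d : PySem.Dict String Int), k ∉ L →
    (L.foldl (fun d j => d.insert j (g j)) d).getD k 0 = d.getD k 0 := by
  induction L with
  | nil => intro d _; rfl
  | cons j t ih =>
    intro d hk
    rw [List.foldl_cons, ih _ (fun h => hk (by simp [h]))]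
    exact PySem.Dict.getD_insert_of_ne _ _ _ (fun h => hk (by simp [h]))

theorem getD_foldl_insert_mem (g : String → Int) (k : String) (L : List String) :
    ∀ (d : PySem.Dict String Int), L.Nodup → k ∈ L →
    (L.foldl (fun d j => d.insert j (g j)) d).getD k 0 = g k := by
  induction L with
  | nil => intro d _ hk; cases hk
  | cons j t ih =>
    intro d hnd hk
    rw [List.foldl_cons]
    rcases List.mem_cons.mp hk with hk | hk
    · subst hk
      rw [getD_foldl_insert_not_mem g k t _ (List.nodup_cons.mp hnd).1]
      exact PySem.Dict.getD_insert_self _ _ _ _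
    · exact ih _ (List.nodup_cons.mp hnd).2 hk

theorem set_update_self (s : List String) : ∀ (l : List String), (∀ x ∈ l, x ∈ s) →
    PySem.Set.update s l = s := by
  intro l
  induction l with
  | nil => intro _; rfl
  | cons x t ih =>
    intro h
    have hx : PySem.Set.contains s x = true := by simp [PySem.Set.contains, h x (by simp)]
    simp only [PySem.Set.update, List.foldl_cons, PySem.Set.add]
    rw [if_pos hx]
    exact ih (fun y hy => h y (by simp [hy]))

-- B's fold equals the max? fold (scores are nonnegative, so -1 never survives a step)
theorem foldB_some (f : String → Int) (xs : List String) :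
    ∀ (m : String),
    (xs.foldl (fun (st : Option String × Int) k =>
        if st.2 < f k then (some k, f k) else st) (some m, f m)).1
      = xs.foldl (maxStep f) (some m) := by
  induction xs with
  | nil => intro m; rfl
  | cons x t ih =>
    intro m
    by_cases h : f m < f x
    · simp only [List.foldl_cons, maxStep, h, if_true]
      exact ih x
    · simp only [List.foldl_cons, maxStep, h, if_false]
      exact ih m

theorem foldB_eq_max? (f : String → Int) (hf : ∀ k, 0 ≤ f k) (xs : List String) :
    (xs.foldl (fun (st : Option String × Int) k =>
        if st.2 < f k then (some k, f k) else st) (none, -1)).1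
      = PySem.List.max? xs f := by
  cases xs with
  | nil => rfl
  | cons x t =>
    rw [max?_eq_foldl_maxStep]
    have h0 : (-1 : Int) < f x := lt_of_lt_of_le (by norm_num) (hf x)
    simp only [List.foldl_cons, if_pos h0, maxStep]
    exact foldB_some f t x

theorem pySumYes_nonneg (l : List String) : 0 ≤ pySumYes l := by
  have := PySem.List.foldl_beq_add_one (l := l) (v := "yes") (a := (0 : Int))
  unfold pySumYes
  rw [this]
  positivity

theorem main_equiv (g : String → Int) (hgnn : ∀ k, 0 ≤ g k) (pd : List (String × String)) :
    (if ((pd.foldl (fun d p => d.insert p.1 (0 : Int)) PySem.Dict.empty).keys.foldl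
          (fun d k => d.insert k (g k))
          (pd.foldl (fun d p => d.insert p.1 (0 : Int)) PySem.Dict.empty)).size ≠ 0 then
       PySem.List.max?
         ((pd.foldl (fun d p => d.insert p.1 (0 : Int)) PySem.Dict.empty).keys.foldl
            (fun d k => d.insert k (g k))
            (pd.foldl (fun d p => d.insert p.1 (0 : Int)) PySem.Dict.empty)).keys
         (fun k =>
           (((pd.foldl (fun d p => d.insert p.1 (0 : Int)) PySem.Dict.empty).keys.foldl
                (fun d k => d.insert k (g k))
                (pd.foldl (fun d p => d.insert p.1 (0 : Int)) PySem.Dict.empty)).getD k 0))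
     else none)
    = (pd.foldl (fun (st : Option String × Int) p =>
         if st.2 < g p.1 then (some p.1, g p.1) else st) (none, -1)).1 := by
  set xs := pd.map Prod.fst with hxs
  set d1 := pd.foldl (fun d p => d.insert p.1 (0 : Int)) PySem.Dict.empty with hd1
  have hkeys1 : d1.keys = PySem.Set.ofList xs := by
    rw [hd1, PySem.Dict.keys_foldl_insert_key pd Prod.fst (fun _ _ => (0 : Int)) PySem.Dict.empty]
    rfl
  have hKnodup : d1.keys.Nodup := hkeys1 ▸ PySem.Set.nodup_ofList xs
  set d2 := d1.keys.foldl (fun d k => d.insert k (g k)) d1 with hd2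
  have hkeys2 : d2.keys = d1.keys := by
    rw [hd2, PySem.Dict.keys_foldl_insert d1.keys (fun _ j => g j) d1]
    exact set_update_self d1.keys d1.keys (fun x hx => hx)
  have hKeq : d1.keys = newElems [] xs := by
    rw [hkeys1]
    simpa [PySem.Set.ofList, PySem.Set.update, PySem.Set.empty] using
      update_eq_append_newElems xs []
  have hB : (pd.foldl (fun (st : Option String × Int) p =>
      if st.2 < g p.1 then (some p.1, g p.1) else st) (none, -1)).1
      = PySem.List.max? xs g := by
    have h := foldB_eq_max? g hgnn xs
    rw [hxs, List.foldl_map] at h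
    exact h
  by_cases hnil : xs = []
  · have hK0 : d1.keys = [] := by rw [hkeys1, hnil]; rfl
    have hsz : d2.size = 0 := by
      have h := congrArg List.length (hkeys2.trans hK0)
      simpa [PySem.Dict.keys, PySem.Dict.size] using h
    rw [if_neg (by simp [hsz]), hB, hnil]
    rfl
  · have hKne : d1.keys ≠ [] := by
      rw [hKeq]
      obtain ⟨x, t, hxt⟩ := List.exists_cons_of_ne_nil hnil
      rw [hxt]
      simp [newElems, PySem.Set.contains]
    have hsz : d2.size ≠ 0 := by
      intro h
      apply hKne
      rw [← hkeys2]
      have hit : d2.items = [] := List.length_eq_zero_iff.mp h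
      simp [PySem.Dict.keys, hit]
    rw [if_pos hsz, hkeys2, hB]
    have hgd : ∀ k ∈ d1.keys, d2.getD k 0 = g k := by
      intro k hk
      exact getD_foldl_insert_mem g k d1.keys d1 hKnodup hk
    rw [max?_eq_foldl_maxStep, max?_eq_foldl_maxStep]
    rw [foldl_maxStep_congr (fun k => d2.getD k 0) g d1.keys none hgd (by intro m h; cases h)]
    rw [hKeq]
    exact foldl_maxStep_newElems g xs [] none (by intro x hx; cases hx)

-- ===== VERDICT (by name: the statement is the Claim_ definition above) =====
theorem get_best_disease_spec : Claim_equal_get_best_disease := by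
  intro responses possible_diseases _
  unfold Spec_get_best_disease get_best_disease get_best_disease_alt
  exact main_equiv (fun k => pySumYes ((PySem.Dict.ofList responses).getD k []))
    (fun k => pySumYes_nonneg _) possible_diseases
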